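-- pv_equiv track=rewrite | github.com/DevilTrixster/Curs | multiplication_matrix.py | convert_sokolov_to_python
-- ===== SOURCE A (Python) =====
-- def convert_sokolov_to_python(text):
--     """Конвертирует формат Соколова в стандартный Python формат"""
--     # Обрабатываем матрицы с квадратными скобками
--     if text.startswith('[') and text.endswith(']'):
--         # Заменяем точки с запятой на '], [' для разделения строк
--         depth = 0
--         result = []
--         i = 0
--
--         while i < len(text):
--             char = text[i]
--
--             if char == '[':
--                 depth += 1
--                 result.append(char)
--             elif char == ']':
--                 depth -= 1
--                 result.append(char)
--             elif char == ';' and depth == 1: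
--                 # Заменяем точку с запятой на '], ['
--                 result.append('], [')
--             elif char == ';' and depth > 1:
--                 # Для вложенных уровней просто заменяем на запятую
--                 result.append(',')
--             else:
--                 result.append(char)
--
--             i += 1
--
--         return ''.join(result)
--     return text
-- ===== SOURCE B (Python) =====
-- def convert_sokolov_to_python(text):
--     """Конвертирует формат Соколова в стандартный Python формат"""
--     if not (text.startswith('[') and text.endswith(']')):
--         return text
--     # Pass 1: depth table — the bracket depth associated with each position.
--     depths = []
--     d = 0
--     for ch in text:
--         if ch == '[':
--             d += 1
--         elif ch == ']':
--             d -= 1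
--         depths.append(d)
--     # Pass 2: emit from (char, depth) pairs.
--     out = []
--     for ch, d in zip(text, depths):
--         if ch == ';' and d == 1:
--             out.append('], [')
--         elif ch == ';' and d > 1:
--             out.append(',')
--         else:
--             out.append(ch)
--     return ''.join(out)
-- ===== Notes on version B (the rewrite author's own statement) =====
-- stated objective: alternative
-- what changed: Replaces A's single while-loop that interleaves depth tracking with output emission by two separate passes: pass 1 materializes an explicit per-character bracket-depth table, pass 2 maps (char, depth) pairs to output fragments.
import Mathlib
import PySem

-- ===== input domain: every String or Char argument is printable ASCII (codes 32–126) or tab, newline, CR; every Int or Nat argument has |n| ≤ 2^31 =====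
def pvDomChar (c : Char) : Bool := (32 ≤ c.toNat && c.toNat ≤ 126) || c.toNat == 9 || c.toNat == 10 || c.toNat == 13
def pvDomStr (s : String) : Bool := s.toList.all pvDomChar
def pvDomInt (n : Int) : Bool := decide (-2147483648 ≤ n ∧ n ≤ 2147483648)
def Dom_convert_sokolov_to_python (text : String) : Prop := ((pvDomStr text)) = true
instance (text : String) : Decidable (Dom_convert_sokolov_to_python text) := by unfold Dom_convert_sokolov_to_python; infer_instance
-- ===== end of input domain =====

-- B rewrites A as two passes (an explicit depth table, then an emit map over (char, depth) pairs); same O(n) cost, alternative decomposition.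


-- ===== PORT A =====
-- Port of A: one pass over the characters, folding (depth, result-fragments) exactly as the while loop does.
def pvStepA (st : Int × List String) (c : Char) : Int × List String :=
  if c = '[' then (st.1 + 1, st.2 ++ [String.mk [c]])
  else if c = ']' then (st.1 - 1, st.2 ++ [String.mk [c]])
  else if c = ';' ∧ st.1 = 1 then (st.1, st.2 ++ ["], ["])
  else if c = ';' ∧ st.1 > 1 then (st.1, st.2 ++ [","])
  else (st.1, st.2 ++ [String.mk [c]])

def convert_sokolov_to_python (text : String) : String :=
  if PySem.Str.startswith text "[" && PySem.Str.endswith text "]" then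
    String.join ((text.toList.foldl pvStepA ((0 : Int), ([] : List String))).2)
  else text

-- ===== PORT B =====
-- Port of B: pass 1 builds an explicit depth table; pass 2 maps over (char, depth) pairs.
def pvStepD (st : Int × List Int) (c : Char) : Int × List Int :=
  let d := if c = '[' then st.1 + 1 else if c = ']' then st.1 - 1 else st.1
  (d, st.2 ++ [d])

def pvEmitB (p : Char × Int) : String :=
  if p.1 = ';' ∧ p.2 = 1 then "], ["
  else if p.1 = ';' ∧ p.2 > 1 then ","
  else String.mk [p.1]

def convert_sokolov_to_python_alt (text : String) : String :=
  if PySem.Str.startswith text "[" && PySem.Str.endswith text "]" then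
    let depths := (text.toList.foldl pvStepD ((0 : Int), ([] : List Int))).2
    String.join ((text.toList.zip depths).map pvEmitB)
  else text

-- ===== PRECONDITION & SPEC =====
def Spec_convert_sokolov_to_python (text : String) (out : String) : Prop := out = convert_sokolov_to_python_alt text
instance (text : String) (out : String) : Decidable (Spec_convert_sokolov_to_python text out) := by unfold Spec_convert_sokolov_to_python; infer_instance

-- ===== CLAIM (what is proved, stated in full; the proofs are below) =====
def Claim_equal_convert_sokolov_to_python : Prop := ∀ (text : String), Dom_convert_sokolov_to_python text → Spec_convert_sokolov_to_python text (convert_sokolov_to_python text)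

-- ===== LEMMAS AND PROOFS =====

def pvNewDepth (c : Char) (d : Int) : Int :=
  if c = '[' then d + 1 else if c = ']' then d - 1 else d

-- depth table, recursively: each position gets the depth AFTER processing that character
def pvDepths (cs : List Char) (d : Int) : List Int :=
  match cs with
  | [] => []
  | c :: cs => pvNewDepth c d :: pvDepths cs (pvNewDepth c d)

lemma foldD_acc (cs : List Char) (d : Int) (dl : List Int) :
    (cs.foldl pvStepD (d, dl)).2 = dl ++ pvDepths cs d := by
  induction cs generalizing d dl with
  | nil => simp [pvDepths]
  | cons c cs ih => simp [List.foldl, pvStepD, pvDepths, pvNewDepth, ih, List.append_assoc]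

lemma foldA_acc (cs : List Char) (d : Int) (acc : List String) :
    (cs.foldl pvStepA (d, acc)).2 = acc ++ (cs.foldl pvStepA (d, [])).2 := by
  induction cs generalizing d acc with
  | nil => simp
  | cons c cs ih =>
    simp only [List.foldl]
    rw [show (cs.foldl pvStepA (pvStepA (d, acc) c)) = cs.foldl pvStepA ((pvStepA (d, acc) c).1, (pvStepA (d, acc) c).2) from rfl]
    rw [ih, ih ((pvStepA (d, []) c).1)]
    unfold pvStepA
    split_ifs <;> simp

-- A's step writes exactly the fragment B's emitter produces at the post-step depth
lemma stepA_emit (d : Int) (acc : List String) (c : Char) :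
    pvStepA (d, acc) c = (pvNewDepth c d, acc ++ [pvEmitB (c, pvNewDepth c d)]) := by
  unfold pvStepA pvEmitB pvNewDepth
  split_ifs with h1 h2 h3 h4 <;> simp_all <;> omega

lemma foldA_eq_map (cs : List Char) (d : Int) :
    (cs.foldl pvStepA (d, [])).2 = (cs.zip (pvDepths cs d)).map pvEmitB := by
  induction cs generalizing d with
  | nil => simp [pvDepths]
  | cons c cs ih =>
    simp only [List.foldl, pvDepths, stepA_emit, List.zip_cons_cons, List.map_cons]
    rw [foldA_acc, ih]
    simp

-- ===== VERDICT (by name: the statement is the Claim_ definition above) =====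
theorem convert_sokolov_to_python_spec : Claim_equal_convert_sokolov_to_python := by
  intro text _
  unfold Spec_convert_sokolov_to_python convert_sokolov_to_python convert_sokolov_to_python_alt
  split
  · rw [foldA_eq_map, foldD_acc]
    simp
  · rfl
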